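-- pv_equiv track=rewrite | github.com/Praba1804/GenAi | main.py | should_handoff_to_user
-- ===== SOURCE A (Python) =====
-- HANDOFF_PHRASES = [
--     "let me know", "can you tell me", "what do you think", "could you share", "please provide", "would you like", "do you have", "are you considering", "what's your", "what is your", "how about you", "tell me more", "could you clarify", "may I ask", "would you mind"
-- ]
--
-- def should_handoff_to_user(response: str) -> bool:
--     resp = response.strip().lower()
--     if resp.endswith("?"):
--         return True
--     for phrase in HANDOFF_PHRASES:
--         if phrase in resp:
--             return True
--     return False
-- ===== SOURCE B (Python) =====
-- HANDOFF_PHRASES = [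
--     "let me know", "can you tell me", "what do you think", "could you share", "please provide", "would you like", "do you have", "are you considering", "what's your", "what is your", "how about you", "tell me more", "could you clarify", "may I ask", "would you mind"
-- ]
--
-- def should_handoff_to_user(response: str) -> bool:
--     resp = response.strip().lower()
--     if resp.endswith("?"):
--         return True
--     # position-major single sweep: at each offset, test whether any phrase starts there
--     return any(resp.startswith(p, i) for i in range(len(resp) + 1) for p in HANDOFF_PHRASES)
-- ===== Notes on version B (the rewrite author's own statement) =====
-- stated objective: alternative
-- what changed: A scans the text once per phrase (phrase-major, via substring 'in'); B does one position-major sweep over the text, testing at each offset whether any phrase starts there.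
import Mathlib
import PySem

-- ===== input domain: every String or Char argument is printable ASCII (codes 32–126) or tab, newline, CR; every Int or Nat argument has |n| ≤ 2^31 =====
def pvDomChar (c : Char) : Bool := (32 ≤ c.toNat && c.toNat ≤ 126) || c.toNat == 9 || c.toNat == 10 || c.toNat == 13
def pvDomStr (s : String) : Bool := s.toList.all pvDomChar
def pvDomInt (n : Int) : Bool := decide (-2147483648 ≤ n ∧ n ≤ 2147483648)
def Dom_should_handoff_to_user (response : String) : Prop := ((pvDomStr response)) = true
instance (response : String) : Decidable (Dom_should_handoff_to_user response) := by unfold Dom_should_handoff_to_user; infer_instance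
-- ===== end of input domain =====

-- B replaces A's phrase-by-phrase substring scans with one position-major sweep
-- (at each offset, test whether any phrase starts there); alternative structure, same cost class.

def HANDOFF_PHRASES : List String := [
  "let me know", "can you tell me", "what do you think", "could you share",
  "please provide", "would you like", "do you have", "are you considering",
  "what's your", "what is your", "how about you", "tell me more",
  "could you clarify", "may I ask", "would you mind"]

-- ===== PORT A =====
-- A's early-return 'for phrase in HANDOFF_PHRASES' loop
def handoffLoopA (phrases : List String) (resp : String) : Bool :=
  match phrases with
  | [] => false
  | p :: rest => if PySem.Str.isIn p resp then true else handoffLoopA rest resp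

def should_handoff_to_user (response : String) : Bool :=
  let resp := PySem.Str.lower (PySem.Str.strip response)
  if PySem.Str.endswith resp "?" then true
  else handoffLoopA HANDOFF_PHRASES resp

-- ===== PORT B =====
def should_handoff_to_user_alt (response : String) : Bool :=
  let cs := PySem.Chars.lower (PySem.Chars.strip response.toList)
  if PySem.Chars.endswith cs ['?'] then true
  else (List.range (cs.length + 1)).any
        (fun i => HANDOFF_PHRASES.any (fun p => p.toList.isPrefixOf (cs.drop i)))

-- ===== PRECONDITION & SPEC =====
def Spec_should_handoff_to_user (response : String) (out : Bool) : Prop := out = should_handoff_to_user_alt response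
instance (response : String) (out : Bool) : Decidable (Spec_should_handoff_to_user response out) := by unfold Spec_should_handoff_to_user; infer_instance

-- ===== CLAIM (what is proved, stated in full; the proofs are below) =====
def Claim_equal_should_handoff_to_user : Prop := ∀ (response : String), Dom_should_handoff_to_user response → Spec_should_handoff_to_user response (should_handoff_to_user response)

-- ===== LEMMAS AND PROOFS =====

theorem handoffLoopA_eq_any (phrases : List String) (resp : String) :
    handoffLoopA phrases resp = phrases.any (fun p => PySem.Str.isIn p resp) := by
  induction phrases with
  | nil => rfl
  | cons p rest ih =>
    simp only [handoffLoopA, List.any_cons, ih]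
    cases h : PySem.Str.isIn p resp <;> simp_all

theorem infix_iff_prefix_drop_bounded (sub cs : List Char) :
    sub <:+: cs ↔ ∃ i ≤ cs.length, sub <+: cs.drop i := by
  constructor
  · intro h
    rcases List.infix_iff_prefix_suffix.mp h with ⟨t, hp, hs⟩
    rcases hs with ⟨pre, hpre⟩
    refine ⟨pre.length, ?_, ?_⟩
    · have := congrArg List.length hpre; simp at this; omega
    · have hd : cs.drop pre.length = t := by rw [← hpre]; simp
      rw [hd]; exact hp
  · rintro ⟨i, _, h⟩
    exact h.isInfix.trans (List.drop_suffix i cs).isInfix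

theorem anyIsIn_eq_sweep (resp : String) :
    HANDOFF_PHRASES.any (fun p => PySem.Str.isIn p resp)
      = (List.range (resp.toList.length + 1)).any
          (fun i => HANDOFF_PHRASES.any (fun p => p.toList.isPrefixOf (resp.toList.drop i))) := by
  rw [Bool.eq_iff_iff]
  simp only [List.any_eq_true, PySem.Str.isIn_iff_infix, List.mem_range,
    List.isPrefixOf_iff_prefix]
  constructor
  · rintro ⟨p, hp, hinf⟩
    rcases (infix_iff_prefix_drop_bounded _ _).mp hinf with ⟨i, hi, hpre⟩
    exact ⟨i, by omega, p, hp, hpre⟩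
  · rintro ⟨i, hi, p, hp, hpre⟩
    exact ⟨p, hp, (infix_iff_prefix_drop_bounded _ _).mpr ⟨i, by omega, hpre⟩⟩

theorem should_handoff_to_user_eq (response : String) :
    should_handoff_to_user response = should_handoff_to_user_alt response := by
  unfold should_handoff_to_user should_handoff_to_user_alt
  dsimp only
  rw [handoffLoopA_eq_any, anyIsIn_eq_sweep]
  simp

-- ===== VERDICT (by name: the statement is the Claim_ definition above) =====
theorem should_handoff_to_user_spec : Claim_equal_should_handoff_to_user := by
  intro response _
  exact should_handoff_to_user_eq response
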